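-- pv_equiv track=rewrite | github.com/pleachcx/billymeierposts | scripts/build_earthquake_event_ledger.py | build_alias_lookup
-- ===== SOURCE A (Python) =====
-- from typing import Any
--
-- def build_alias_lookup(overrides: dict[str, dict[str, Any]]) -> list[tuple[str, str]]:
--     alias_pairs: list[tuple[str, str]] = []
--     for canonical_name, payload in overrides.items():
--         alias_pairs.append((canonical_name.lower(), canonical_name))
--         for alias in payload.get("aliases", []):
--             alias_pairs.append((alias.lower(), canonical_name))
--     alias_pairs.sort(key=lambda item: len(item[0]), reverse=True)
--     return alias_pairs
-- ===== SOURCE B (Python) =====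
-- def build_alias_lookup(overrides):
--     # Bucket the (lowered name, canonical) pairs by key length in one pass,
--     # then emit buckets in decreasing length order (stable within a bucket).
--     buckets = {}
--     for canonical_name, payload in overrides.items():
--         for name in [canonical_name] + list(payload.get("aliases", [])):
--             key = name.lower()
--             buckets.setdefault(len(key), []).append((key, canonical_name))
--     result = []
--     for length in sorted(buckets, reverse=True):
--         result.extend(buckets[length])
--     return result
-- ===== Notes on version B (the rewrite author's own statement) =====
-- stated objective: alternative
-- what changed: Replaces the comparison sort of all pairs by a single-pass grouping into length-keyed buckets followed by one sort of the distinct lengths only (a bucket sort on key length, stable within buckets); same measured cost.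
import Mathlib
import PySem

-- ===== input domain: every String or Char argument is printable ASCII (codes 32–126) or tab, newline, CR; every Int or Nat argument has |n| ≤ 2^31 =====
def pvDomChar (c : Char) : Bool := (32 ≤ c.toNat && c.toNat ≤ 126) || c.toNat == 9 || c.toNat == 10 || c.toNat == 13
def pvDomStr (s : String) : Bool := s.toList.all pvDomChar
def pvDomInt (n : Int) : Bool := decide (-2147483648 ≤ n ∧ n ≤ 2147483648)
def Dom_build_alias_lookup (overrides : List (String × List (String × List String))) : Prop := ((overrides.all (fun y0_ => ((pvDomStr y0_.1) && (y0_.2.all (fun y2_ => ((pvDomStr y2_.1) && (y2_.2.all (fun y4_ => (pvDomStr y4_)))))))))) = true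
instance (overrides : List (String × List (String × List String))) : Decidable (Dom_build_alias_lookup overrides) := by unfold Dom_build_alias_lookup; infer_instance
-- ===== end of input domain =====

-- B replaces the comparison sort of all (alias, canonical) pairs by one grouping pass into
-- length-keyed buckets plus a sort of the distinct lengths only (objective: alternative algorithm).


-- ===== PORT A =====
def build_alias_lookup (overrides : List (String × List (String × List String))) : List (String × String) :=
  let alias_pairs : List (String × String) :=
    overrides.foldl (fun acc p =>
      ((PySem.Dict.mk p.2).getD "aliases" []).foldl
        (fun acc al => acc ++ [(PySem.Str.lower al, p.1)])
        (acc ++ [(PySem.Str.lower p.1, p.1)])) []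
  PySem.List.sorted alias_pairs (fun item => PySem.Str.len item.1) true

-- ===== PORT B =====
def build_alias_lookup_alt (overrides : List (String × List (String × List String))) : List (String × String) :=
  let buckets : PySem.Dict Int (List (String × String)) :=
    overrides.foldl (fun d p =>
      (p.1 :: (PySem.Dict.mk p.2).getD "aliases" []).foldl
        (fun d name =>
          d.modify (PySem.Str.len (PySem.Str.lower name)) []
            (fun b => b ++ [(PySem.Str.lower name, p.1)])) d)
      PySem.Dict.empty
  (PySem.List.sorted buckets.keys (fun k => k) true).foldl
    (fun acc len => acc ++ buckets.getD len []) []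

-- ===== PRECONDITION & SPEC =====
def Spec_build_alias_lookup (overrides : List (String × List (String × List String))) (out : List (String × String)) : Prop := out = build_alias_lookup_alt overrides
instance (overrides : List (String × List (String × List String))) (out : List (String × String)) : Decidable (Spec_build_alias_lookup overrides out) := by unfold Spec_build_alias_lookup; infer_instance

-- ===== CLAIM (what is proved, stated in full; the proofs are below) =====
def Claim_equal_build_alias_lookup : Prop := ∀ (overrides : List (String × List (String × List String))), Dom_build_alias_lookup overrides → Spec_build_alias_lookup overrides (build_alias_lookup overrides)

-- ===== LEMMAS AND PROOFS =====

-- the flat list of (lowered name, canonical) pairs both programs ultimately arrange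
def pvGroup (p : String × List (String × List String)) : List (String × String) :=
  (PySem.Str.lower p.1, p.1) ::
    ((PySem.Dict.mk p.2).getD "aliases" []).map (fun a => (PySem.Str.lower a, p.1))

def pvPairs (overrides : List (String × List (String × List String))) : List (String × String) :=
  overrides.flatMap pvGroup

-- a nested loop over groups is the loop over the flattened list
theorem pv_foldl_flatMap {α β γ : Type} (l : List α) (g : α → List β) (f : γ → β → γ) (init : γ) :
    l.foldl (fun d p => (g p).foldl f d) init = (l.flatMap g).foldl f init := by
  induction l generalizing init with
  | nil => rfl
  | cons a l ih => simp [List.foldl_append, ih]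

-- insertBy passes over a block it does not insert before
theorem pv_insertBy_append {α : Type} (before : α → α → Bool) (x : α) (as bs : List α)
    (h : ∀ a ∈ as, before x a = false) :
    PySem.List.insertBy before x (as ++ bs) = as ++ PySem.List.insertBy before x bs := by
  induction as with
  | nil => rfl
  | cons a as ih =>
      have ha : before x a = false := h a (by simp)
      simp only [List.cons_append, PySem.List.insertBy, ha]
      simp only [Bool.false_eq_true, if_false, List.cons.injEq, true_and]
      exact ih (fun b hb => h b (by simp [hb]))

-- insertBy puts x in front of a block it beats entirely
theorem pv_insertBy_front {α : Type} (before : α → α → Bool) (x : α) (bs : List α)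
    (h : ∀ b ∈ bs, before x b = true) :
    PySem.List.insertBy before x bs = x :: bs := by
  cases bs with
  | nil => rfl
  | cons b bs => simp [PySem.List.insertBy, h b (by simp)]

-- inserting x into a grouped list whose group (key x) already exists: x joins the end of its group
theorem pv_insert_grouped_mem {α : Type} (key : α → Int) (x : α) (D : List Int) (F : Int → List α)
    (hD : D.Pairwise (fun a b => b < a)) (hF : ∀ c ∈ D, ∀ q ∈ F c, key q = c) (hmem : key x ∈ D) :
    PySem.List.insertBy (fun a b => decide (key b < key a)) x (D.flatMap F)
      = D.flatMap (fun c => F c ++ if key x = c then [x] else []) := by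
  induction D with
  | nil => exact absurd hmem (List.not_mem_nil)
  | cons c D ih =>
      have hpair := (List.pairwise_cons.mp hD)
      have hFc : ∀ q ∈ F c, key q = c := hF c (by simp)
      simp only [List.flatMap_cons]
      by_cases hc : key x = c
      · have h1 : ∀ a ∈ F c, (fun a b => decide (key b < key a)) x a = false := by
          intro q hq; simp [hFc q hq, hc]
        have h2 : ∀ b ∈ D.flatMap F, (fun a b => decide (key b < key a)) x b = true := by
          intro q hq
          obtain ⟨c', hc', hqc'⟩ := List.mem_flatMap.mp hq
          have hk := hF c' (by simp [hc']) q hqc'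
          have hlt : c' < c := hpair.1 c' hc'
          simp [hk, hc]; omega
        rw [pv_insertBy_append (fun a b => decide (key b < key a)) x (F c) (D.flatMap F) h1,
          pv_insertBy_front (fun a b => decide (key b < key a)) x (D.flatMap F) h2]
        have hrest : D.flatMap (fun c => F c ++ if key x = c then [x] else []) = D.flatMap F := by
          apply List.flatMap_congr
          intro c' hc'
          have hlt : c' < c := hpair.1 c' hc'
          have : ¬ (key x = c') := by omega
          simp [this]
        rw [hrest, if_pos hc]
        simp
      · have hmem' : key x ∈ D := by
          rcases List.mem_cons.mp hmem with h | h
          · exact absurd h hc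
          · exact h
        have h1 : ∀ a ∈ F c, (fun a b => decide (key b < key a)) x a = false := by
          intro q hq
          have hkx : key x < c := hpair.1 _ hmem'
          simp [hFc q hq]; omega
        rw [pv_insertBy_append (fun a b => decide (key b < key a)) x (F c) (D.flatMap F) h1,
          ih hpair.2 (fun c' hc' => hF c' (by simp [hc'])) hmem', if_neg hc]
        simp

-- inserting x whose key is new: the key list itself gains (key x) at the matching spot
theorem pv_insert_grouped_not_mem {α : Type} (key : α → Int) (x : α) (D : List Int) (F : Int → List α)
    (hD : D.Pairwise (fun a b => b < a)) (hF : ∀ c ∈ D, ∀ q ∈ F c, key q = c)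
    (hmem : key x ∉ D) (hnil : F (key x) = []) :
    PySem.List.insertBy (fun a b => decide (key b < key a)) x (D.flatMap F)
      = (PySem.List.insertBy (fun a b => decide (b < a)) (key x) D).flatMap
          (fun c => F c ++ if key x = c then [x] else []) := by
  induction D with
  | nil => simp [PySem.List.insertBy, hnil]
  | cons c D ih =>
      have hpair := (List.pairwise_cons.mp hD)
      have hFc : ∀ q ∈ F c, key q = c := hF c (by simp)
      have hne : key x ≠ c := fun h => hmem (by simp [h])
      have hmem' : key x ∉ D := fun h => hmem (by simp [h])
      by_cases hlt : c < key x
      · have h2 : ∀ b ∈ (c :: D).flatMap F, (fun a b => decide (key b < key a)) x b = true := by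
          intro q hq
          obtain ⟨c', hc', hqc'⟩ := List.mem_flatMap.mp hq
          have hk := hF c' hc' q hqc'
          rcases List.mem_cons.mp hc' with h | h
          · simp [hk, h]; omega
          · have : c' < c := hpair.1 c' h
            simp [hk]; omega
        rw [pv_insertBy_front (fun a b => decide (key b < key a)) x ((c :: D).flatMap F) h2]
        have hins : PySem.List.insertBy (fun a b => decide (b < a)) (key x) (c :: D)
            = key x :: c :: D := by simp [PySem.List.insertBy, hlt]
        rw [hins]
        have hrest : (c :: D).flatMap (fun c' => F c' ++ if key x = c' then [x] else [])
            = (c :: D).flatMap F := by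
          apply List.flatMap_congr
          intro c' hc'
          have : ¬ (key x = c') := fun h => hmem (h ▸ hc')
          simp [this]
        simp only [List.flatMap_cons, hrest]
        simp [hnil]
      · have hgt : key x < c := by
          rcases lt_trichotomy c (key x) with h | h | h
          · exact absurd h hlt
          · exact absurd h.symm hne
          · exact h
        have h1 : ∀ a ∈ F c, (fun a b => decide (key b < key a)) x a = false := by
          intro q hq; simp [hFc q hq]; omega
        have hins : PySem.List.insertBy (fun a b => decide (b < a)) (key x) (c :: D)
            = c :: PySem.List.insertBy (fun a b => decide (b < a)) (key x) D := by
          simp [PySem.List.insertBy]; omega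
        rw [hins]
        simp only [List.flatMap_cons]
        rw [pv_insertBy_append (fun a b => decide (key b < key a)) x (F c) (D.flatMap F) h1,
          ih hpair.2 (fun c' hc' => hF c' (by simp [hc'])) hmem', if_neg hne]
        simp

-- the stable reverse sort by an Int key is the descending distinct keys with their stable groups
theorem pv_sorted_rev_groups {α : Type} (key : α → Int) (xs : List α) :
    PySem.List.sorted xs key true
      = (PySem.List.sorted (PySem.Set.ofList (xs.map key)) (fun k => k) true).flatMap
          (fun c => xs.filter (fun q => key q == c)) := by
  induction xs using List.reverseRecOn with
  | nil => rfl
  | append_singleton xs x ih =>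
      have hstep : PySem.List.sorted (xs ++ [x]) key true
          = PySem.List.insertBy (fun a b => decide (key b < key a)) x
              (PySem.List.sorted xs key true) := by
        rw [PySem.List.sorted_rev_eq_foldl_insertBy, PySem.List.sorted_rev_eq_foldl_insertBy,
          List.foldl_append]
        rfl
      set D := PySem.List.sorted (PySem.Set.ofList (xs.map key)) (fun k => k) true with hDdef
      have hDperm : D.Perm (PySem.Set.ofList (xs.map key)) := PySem.List.sorted_perm _ _ _
      have hDnodup : D.Nodup := hDperm.nodup_iff.mpr (PySem.Set.nodup_ofList _)
      have hDle := PySem.List.sorted_pairwise_rev (PySem.Set.ofList (xs.map key)) (fun k => k)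
      have hD : D.Pairwise (fun a b => b < a) :=
        (hDle.and hDnodup).imp (fun h => lt_of_le_of_ne h.1 h.2.symm)
      have hF : ∀ c ∈ D, ∀ q ∈ xs.filter (fun q => key q == c), key q = c := by
        intro c _ q hq
        simpa using (List.mem_filter.mp hq).2
      have hmemD : ∀ c : Int, c ∈ D ↔ c ∈ xs.map key := by
        intro c
        rw [hDdef, PySem.List.mem_sorted, PySem.Set.mem_ofList]
      have hfilter : (fun c => (xs ++ [x]).filter (fun q => key q == c))
          = (fun c => xs.filter (fun q => key q == c) ++ if key x = c then [x] else []) := by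
        funext c
        by_cases h : key x = c
        · simp [List.filter_append, h]
        · simp [List.filter_append, h]
      rw [hstep, ih, hfilter]
      have hmapkey : (xs ++ [x]).map key = xs.map key ++ [key x] := by simp
      rw [hmapkey, PySem.Set.ofList_append_singleton]
      by_cases hmem : key x ∈ xs.map key
      · rw [PySem.Set.add_of_mem (by rwa [PySem.Set.mem_ofList])]
        exact pv_insert_grouped_mem key x D _ hD hF ((hmemD _).mpr hmem)
      · rw [PySem.Set.add_of_not_mem (by rwa [PySem.Set.mem_ofList])]
        have hnil : xs.filter (fun q => key q == key x) = [] := by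
          rw [List.filter_eq_nil_iff]
          intro q hq
          simp only [beq_iff_eq]
          intro h
          exact hmem (h ▸ List.mem_map_of_mem hq)
        rw [pv_insert_grouped_not_mem key x D _ hD hF (fun h => hmem ((hmemD _).mp h)) hnil]
        congr 1
        rw [PySem.List.sorted_rev_eq_foldl_insertBy, List.foldl_append,
          ← PySem.List.sorted_rev_eq_foldl_insertBy]
        rfl

-- A's accumulation loop builds pvPairs
theorem pv_a_pairs (overrides : List (String × List (String × List String)))
    (acc : List (String × String)) :
    overrides.foldl (fun acc p =>
        ((PySem.Dict.mk p.2).getD "aliases" []).foldl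
          (fun acc al => acc ++ [(PySem.Str.lower al, p.1)])
          (acc ++ [(PySem.Str.lower p.1, p.1)])) acc
      = acc ++ pvPairs overrides := by
  induction overrides generalizing acc with
  | nil => simp [pvPairs]
  | cons p l ih =>
      have hcons : pvPairs (p :: l) = pvGroup p ++ pvPairs l := by
        simp [pvPairs]
      rw [List.foldl_cons, PySem.List.foldl_append_singleton_eq_map, ih, hcons, pvGroup]
      simp

-- B's bucket dictionary, expressed over pvPairs
theorem pv_b_buckets (overrides : List (String × List (String × List String))) :
    overrides.foldl (fun d p =>
        (p.1 :: (PySem.Dict.mk p.2).getD "aliases" []).foldl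
          (fun d name =>
            d.modify (PySem.Str.len (PySem.Str.lower name)) []
              (fun b => b ++ [(PySem.Str.lower name, p.1)])) d)
        PySem.Dict.empty
      = (pvPairs overrides).foldl
          (fun d q => d.modify (PySem.Str.len q.1) [] (fun b => b ++ [q])) PySem.Dict.empty := by
  have hinner : ∀ (p : String × List (String × List String)) (d : PySem.Dict Int (List (String × String))),
      (p.1 :: (PySem.Dict.mk p.2).getD "aliases" []).foldl
        (fun d name =>
          d.modify (PySem.Str.len (PySem.Str.lower name)) []
            (fun b => b ++ [(PySem.Str.lower name, p.1)])) d
      = (pvGroup p).foldl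
          (fun d q => d.modify (PySem.Str.len q.1) [] (fun b => b ++ [q])) d := by
    intro p d
    have hg : pvGroup p = (p.1 :: (PySem.Dict.mk p.2).getD "aliases" []).map
        (fun name => (PySem.Str.lower name, p.1)) := by
      simp [pvGroup]
    rw [hg, List.foldl_map]
  rw [PySem.List.foldl_congr_mem overrides _
      (fun d p => (pvGroup p).foldl
        (fun d q => d.modify (PySem.Str.len q.1) [] (fun b => b ++ [q])) d)
      PySem.Dict.empty (fun d p _ => hinner p d),
    pv_foldl_flatMap]
  rfl

-- the two ports agree
theorem pv_main (overrides : List (String × List (String × List String))) :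
    build_alias_lookup overrides = build_alias_lookup_alt overrides := by
  simp only [build_alias_lookup, build_alias_lookup_alt]
  rw [pv_a_pairs overrides [], pv_b_buckets overrides, List.nil_append]
  have hfold : (pvPairs overrides).foldl
        (fun d q => d.modify (PySem.Str.len q.1) [] (fun b => b ++ [q])) PySem.Dict.empty
      = ((pvPairs overrides).map (fun q => (PySem.Str.len q.1, q))).foldl
          (fun d p => d.modify p.1 [] (fun b => b ++ [p.2])) PySem.Dict.empty := by
    rw [List.foldl_map]
  have hkeys : ((pvPairs overrides).foldl
        (fun d q => d.modify (PySem.Str.len q.1) [] (fun b => b ++ [q])) PySem.Dict.empty).keys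
      = PySem.Set.ofList ((pvPairs overrides).map (fun q => PySem.Str.len q.1)) := by
    rw [PySem.Dict.keys_foldl_modify_key (pvPairs overrides) (fun q => PySem.Str.len q.1) []
      (fun _ q => fun b => b ++ [q]) PySem.Dict.empty,
      PySem.Dict.keys_empty, PySem.Set.update_nil_left]
  have hgetD : ∀ c : Int, ((pvPairs overrides).foldl
        (fun d q => d.modify (PySem.Str.len q.1) [] (fun b => b ++ [q])) PySem.Dict.empty).getD c []
      = (pvPairs overrides).filter (fun q => PySem.Str.len q.1 == c) := by
    intro c
    rw [hfold, PySem.Dict.getD_foldl_modify_append, PySem.Dict.getD_empty,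
      List.filter_map, List.map_map]
    simp [Function.comp_def]
  rw [PySem.List.foldl_append_eq_flatMap, List.nil_append, hkeys,
    pv_sorted_rev_groups (fun q => PySem.Str.len q.1) (pvPairs overrides)]
  apply List.flatMap_congr
  intro c _
  rw [hgetD c]

-- ===== VERDICT (by name: the statement is the Claim_ definition above) =====
theorem build_alias_lookup_spec : Claim_equal_build_alias_lookup := by
  intro overrides _
  exact pv_main overrides
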